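-- pv_equiv track=rewrite | github.com/ruxailab/disgitbot | discord_bot/src/pipeline/processors/analytics_processor.py | _calculate_activity_trends
-- ===== SOURCE A (Python) =====
-- def _calculate_activity_trends(contributors, all_contributions):
--     """Calculate aggregated activity trends."""
--     trends = {
--         'daily': {'prs': 0, 'issues': 0, 'commits': 0},
--         'weekly': {'prs': 0, 'issues': 0, 'commits': 0},
--         'monthly': {'prs': 0, 'issues': 0, 'commits': 0}
--     }
--
--     for user in contributors:
--         stats = all_contributions[user].get('stats', {})
--
--         for period in ['daily', 'weekly', 'monthly']:
--             trends[period]['prs'] += stats.get('prs', {}).get(period, 0)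
--             trends[period]['issues'] += stats.get('issues', {}).get(period, 0)
--             trends[period]['commits'] += stats.get('commits', {}).get(period, 0)
--
--     return trends
-- ===== SOURCE B (Python) =====
-- def _calculate_activity_trends(contributors, all_contributions):
--     """Calculate aggregated activity trends."""
--     PERIODS = ('daily', 'weekly', 'monthly')
--     METRICS = ('prs', 'issues', 'commits')
--     totals = dict.fromkeys(((p, m) for p in PERIODS for m in METRICS), 0)
--     for user in contributors:
--         for metric, counts in all_contributions[user].get('stats', {}).items():
--             if metric in METRICS:
--                 for period, n in counts.items():
--                     if period in PERIODS:
--                         totals[(period, metric)] += n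
--     return {p: {m: totals[(p, m)] for m in METRICS} for p in PERIODS}
-- ===== Notes on version B (the rewrite author's own statement) =====
-- stated objective: alternative
-- what changed: Instead of nine fixed get-chain lookups per contributor accumulated into a nested dict, B walks the entries actually present in each contributor's stats dict (items()-driven traversal with membership filters) into a flat (period, metric)-keyed counter, and builds the nested result at the end.
-- outside the precondition, e.g. on _calculate_activity_trends(['ghost'], {}): A raises KeyError, B raises KeyError
import Mathlib
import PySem

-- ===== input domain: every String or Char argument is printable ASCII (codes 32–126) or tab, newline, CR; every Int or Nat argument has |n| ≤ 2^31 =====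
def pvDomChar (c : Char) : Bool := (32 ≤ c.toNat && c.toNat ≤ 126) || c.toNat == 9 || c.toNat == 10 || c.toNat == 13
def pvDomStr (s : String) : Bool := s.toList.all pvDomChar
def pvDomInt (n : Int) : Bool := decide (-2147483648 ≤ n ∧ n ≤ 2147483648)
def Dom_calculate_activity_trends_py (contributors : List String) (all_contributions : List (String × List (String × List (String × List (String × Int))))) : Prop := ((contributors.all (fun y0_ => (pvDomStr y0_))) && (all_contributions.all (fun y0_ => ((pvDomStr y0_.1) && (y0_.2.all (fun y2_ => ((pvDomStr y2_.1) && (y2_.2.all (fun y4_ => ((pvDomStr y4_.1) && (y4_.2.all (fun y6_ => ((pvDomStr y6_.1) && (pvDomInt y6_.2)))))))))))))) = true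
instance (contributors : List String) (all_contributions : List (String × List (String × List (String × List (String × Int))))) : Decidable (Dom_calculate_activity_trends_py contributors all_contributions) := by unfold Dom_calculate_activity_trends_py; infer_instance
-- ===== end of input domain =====

-- B replaces A's nine fixed get-chain lookups per contributor by an items()-driven walk of the stats entries actually present, accumulated in a flat (period, metric)-keyed counter (alternative traversal, same cost).


-- ===== PORT A =====
-- d.get(k, dflt) on an association list: first match, else default
def pvGet {V : Type} (m : List (String × V)) (k : String) (d : V) : V :=
  match m with
  | [] => d
  | (k', v) :: rest => if k' = k then v else pvGet rest k d

-- trends[period][metric] += x : in-place update of the nested association list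
def pvBumpInner (m : List (String × Int)) (k : String) (x : Int) : List (String × Int) :=
  match m with
  | [] => []
  | (k', v) :: rest => if k' = k then (k', v + x) :: rest else (k', v) :: pvBumpInner rest k x

def pvBump (t : List (String × List (String × Int))) (p m : String) (x : Int) : List (String × List (String × Int)) :=
  match t with
  | [] => []
  | (k, d) :: rest => if k = p then (k, pvBumpInner d m x) :: rest else (k, d) :: pvBump rest p m x

-- all_contributions[user] raises KeyError when user is missing; Pre_ excludes that, so the [] default is never reached inside Pre_
def calculate_activity_trends_py (contributors : List String) (all_contributions : List (String × List (String × List (String × List (String × Int))))) : List (String × List (String × Int)) :=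
  contributors.foldl (fun trends user =>
    let stats := pvGet (pvGet all_contributions user []) "stats" []
    ["daily", "weekly", "monthly"].foldl (fun trends period =>
      let t1 := pvBump trends period "prs" (pvGet (pvGet stats "prs" []) period 0)
      let t2 := pvBump t1 period "issues" (pvGet (pvGet stats "issues" []) period 0)
      pvBump t2 period "commits" (pvGet (pvGet stats "commits" []) period 0)) trends)
    [("daily", [("prs", 0), ("issues", 0), ("commits", 0)]),
     ("weekly", [("prs", 0), ("issues", 0), ("commits", 0)]),
     ("monthly", [("prs", 0), ("issues", 0), ("commits", 0)])]

-- ===== PORT B =====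
def pvPeriods : List String := ["daily", "weekly", "monthly"]
def pvMetrics : List String := ["prs", "issues", "commits"]

-- totals[(period, metric)] lookup (key always present; 0 cannot be reached from the alt's totals)
def pvTGet (t : List ((String × String) × Int)) (k : String × String) : Int :=
  match t with
  | [] => 0
  | (k', v) :: rest => if k' = k then v else pvTGet rest k

-- totals[(period, metric)] += x
def pvTBump (t : List ((String × String) × Int)) (k : String × String) (x : Int) : List ((String × String) × Int) :=
  match t with
  | [] => []
  | (k', v) :: rest => if k' = k then (k', v + x) :: rest else (k', v) :: pvTBump rest k x

-- dict.fromkeys(((p, m) for p in PERIODS for m in METRICS), 0)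
def pvTotals0 : List ((String × String) × Int) :=
  pvPeriods.flatMap (fun p => pvMetrics.map (fun m => ((p, m), (0 : Int))))

def calculate_activity_trends_py_alt (contributors : List String) (all_contributions : List (String × List (String × List (String × List (String × Int))))) : List (String × List (String × Int)) :=
  let totals := contributors.foldl (fun tot user =>
    (pvGet (pvGet all_contributions user []) "stats" []).foldl (fun tot mc =>
      if mc.1 ∈ pvMetrics then
        mc.2.foldl (fun tot pn =>
          if pn.1 ∈ pvPeriods then pvTBump tot (pn.1, mc.1) pn.2 else tot) tot
      else tot) tot) pvTotals0
  pvPeriods.map (fun p => (p, pvMetrics.map (fun m => (m, pvTGet totals (p, m)))))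

-- ===== PRECONDITION & SPEC =====
-- Pre_ excludes contributors absent from all_contributions (A raises KeyError there), and association
-- lists with duplicate keys at the stats/period dict levels, which no Python dict can represent.
def Pre_calculate_activity_trends_py (contributors : List String) (all_contributions : List (String × List (String × List (String × List (String × Int))))) : Prop :=
  (∀ u ∈ contributors, u ∈ all_contributions.map Prod.fst) ∧
  (∀ p ∈ all_contributions, ∀ q ∈ p.2, (q.2.map Prod.fst).Nodup ∧ ∀ r ∈ q.2, (r.2.map Prod.fst).Nodup)
instance (contributors : List String) (all_contributions : List (String × List (String × List (String × List (String × Int))))) : Decidable (Pre_calculate_activity_trends_py contributors all_contributions) := by unfold Pre_calculate_activity_trends_py; infer_instance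

def pvWitness_calculate_activity_trends_py : List String × (List (String × List (String × List (String × List (String × Int))))) :=
  (["alice"], [("alice", [("stats", [("prs", [("daily", 2)]), ("commits", [("weekly", 1)])])])])

def Spec_calculate_activity_trends_py (contributors : List String) (all_contributions : List (String × List (String × List (String × List (String × Int))))) (out : List (String × List (String × Int))) : Prop := out = calculate_activity_trends_py_alt contributors all_contributions
instance (contributors : List String) (all_contributions : List (String × List (String × List (String × List (String × Int))))) (out : List (String × List (String × Int))) : Decidable (Spec_calculate_activity_trends_py contributors all_contributions out) := by unfold Spec_calculate_activity_trends_py; infer_instance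

-- ===== CLAIM (what is proved, stated in full; the proofs are below) =====
def Claim_equal_calculate_activity_trends_py : Prop := ∀ (contributors : List String) (all_contributions : List (String × List (String × List (String × List (String × Int))))), Dom_calculate_activity_trends_py contributors all_contributions → Pre_calculate_activity_trends_py contributors all_contributions → Spec_calculate_activity_trends_py contributors all_contributions (calculate_activity_trends_py contributors all_contributions)

-- ===== LEMMAS AND PROOFS =====
-- the shape A's trends dict keeps throughout its loop
def pvCanon (dp di dc wp wi wc mp mi mc : Int) : List (String × List (String × Int)) :=
  [("daily", [("prs", dp), ("issues", di), ("commits", dc)]),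
   ("weekly", [("prs", wp), ("issues", wi), ("commits", wc)]),
   ("monthly", [("prs", mp), ("issues", mi), ("commits", mc)])]

-- one contributor's contribution to the (metric, period) cell as A computes it
def pvCell (all_contributions : List (String × List (String × List (String × List (String × Int))))) (user metric period : String) : Int :=
  pvGet (pvGet (pvGet (pvGet all_contributions user []) "stats" []) metric []) period 0

theorem pvBody_canon (ac : List (String × List (String × List (String × List (String × Int))))) (u : String)
    (dp di dc wp wi wc mp mi mc : Int) :
    (let stats := pvGet (pvGet ac u []) "stats" []
     ["daily", "weekly", "monthly"].foldl (fun trends period =>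
        let t1 := pvBump trends period "prs" (pvGet (pvGet stats "prs" []) period 0)
        let t2 := pvBump t1 period "issues" (pvGet (pvGet stats "issues" []) period 0)
        pvBump t2 period "commits" (pvGet (pvGet stats "commits" []) period 0))
      (pvCanon dp di dc wp wi wc mp mi mc)) =
    pvCanon (dp + pvCell ac u "prs" "daily") (di + pvCell ac u "issues" "daily") (dc + pvCell ac u "commits" "daily")
            (wp + pvCell ac u "prs" "weekly") (wi + pvCell ac u "issues" "weekly") (wc + pvCell ac u "commits" "weekly")
            (mp + pvCell ac u "prs" "monthly") (mi + pvCell ac u "issues" "monthly") (mc + pvCell ac u "commits" "monthly") := by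
  simp [pvCanon, pvCell, List.foldl, pvBump, pvBumpInner]

theorem pvLoop_canon (ac : List (String × List (String × List (String × List (String × Int))))) :
    ∀ (cs : List String) (dp di dc wp wi wc mp mi mc : Int),
    cs.foldl (fun trends user =>
      let stats := pvGet (pvGet ac user []) "stats" []
      ["daily", "weekly", "monthly"].foldl (fun trends period =>
        let t1 := pvBump trends period "prs" (pvGet (pvGet stats "prs" []) period 0)
        let t2 := pvBump t1 period "issues" (pvGet (pvGet stats "issues" []) period 0)
        pvBump t2 period "commits" (pvGet (pvGet stats "commits" []) period 0)) trends)
      (pvCanon dp di dc wp wi wc mp mi mc) =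
    pvCanon (dp + (cs.map (fun u => pvCell ac u "prs" "daily")).sum)
            (di + (cs.map (fun u => pvCell ac u "issues" "daily")).sum)
            (dc + (cs.map (fun u => pvCell ac u "commits" "daily")).sum)
            (wp + (cs.map (fun u => pvCell ac u "prs" "weekly")).sum)
            (wi + (cs.map (fun u => pvCell ac u "issues" "weekly")).sum)
            (wc + (cs.map (fun u => pvCell ac u "commits" "weekly")).sum)
            (mp + (cs.map (fun u => pvCell ac u "prs" "monthly")).sum)
            (mi + (cs.map (fun u => pvCell ac u "issues" "monthly")).sum)
            (mc + (cs.map (fun u => pvCell ac u "commits" "monthly")).sum) := by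
  intro cs
  induction cs with
  | nil => intro dp di dc wp wi wc mp mi mc; simp
  | cons u rest ih =>
    intro dp di dc wp wi wc mp mi mc
    rw [List.foldl_cons, pvBody_canon, ih]
    simp [pvCanon, add_assoc]

-- the shape B's flat totals dict keeps throughout its loop (same key order as pvTotals0)
def pvT (dp di dc wp wi wc mp mi mc : Int) : List ((String × String) × Int) :=
  [(("daily", "prs"), dp), (("daily", "issues"), di), (("daily", "commits"), dc),
   (("weekly", "prs"), wp), (("weekly", "issues"), wi), (("weekly", "commits"), wc),
   (("monthly", "prs"), mp), (("monthly", "issues"), mi), (("monthly", "commits"), mc)]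

-- sum of the values of all entries of c whose key is p
def pvMatchSum (c : List (String × Int)) (p : String) : Int :=
  match c with
  | [] => 0
  | (k, v) :: rest => (if k = p then v else 0) + pvMatchSum rest p

-- sum over all entries of s with key m of pvMatchSum of their value at p
def pvDSum (s : List (String × List (String × Int))) (m p : String) : Int :=
  match s with
  | [] => 0
  | (k, c) :: rest => (if k = m then pvMatchSum c p else 0) + pvDSum rest m p

theorem pvTBump_pvT (p m : String) (v dp di dc wp wi wc mp mi mc : Int) :
    pvTBump (pvT dp di dc wp wi wc mp mi mc) (p, m) v =
    pvT (dp + if p = "daily" ∧ m = "prs" then v else 0)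
        (di + if p = "daily" ∧ m = "issues" then v else 0)
        (dc + if p = "daily" ∧ m = "commits" then v else 0)
        (wp + if p = "weekly" ∧ m = "prs" then v else 0)
        (wi + if p = "weekly" ∧ m = "issues" then v else 0)
        (wc + if p = "weekly" ∧ m = "commits" then v else 0)
        (mp + if p = "monthly" ∧ m = "prs" then v else 0)
        (mi + if p = "monthly" ∧ m = "issues" then v else 0)
        (mc + if p = "monthly" ∧ m = "commits" then v else 0) := by
  by_cases hp1 : p = "daily" <;> by_cases hp2 : p = "weekly" <;> by_cases hp3 : p = "monthly" <;>
    by_cases hm1 : m = "prs" <;> by_cases hm2 : m = "issues" <;> by_cases hm3 : m = "commits" <;>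
    simp_all [pvTBump, pvT, eq_comm]

theorem pvInner_canon : ∀ (c : List (String × Int)) (m : String), m ∈ pvMetrics →
    ∀ (dp di dc wp wi wc mp mi mc : Int),
    c.foldl (fun tot pn => if pn.1 ∈ pvPeriods then pvTBump tot (pn.1, m) pn.2 else tot)
      (pvT dp di dc wp wi wc mp mi mc) =
    pvT (dp + (if m = "prs" then pvMatchSum c "daily" else 0))
        (di + (if m = "issues" then pvMatchSum c "daily" else 0))
        (dc + (if m = "commits" then pvMatchSum c "daily" else 0))
        (wp + (if m = "prs" then pvMatchSum c "weekly" else 0))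
        (wi + (if m = "issues" then pvMatchSum c "weekly" else 0))
        (wc + (if m = "commits" then pvMatchSum c "weekly" else 0))
        (mp + (if m = "prs" then pvMatchSum c "monthly" else 0))
        (mi + (if m = "issues" then pvMatchSum c "monthly" else 0))
        (mc + (if m = "commits" then pvMatchSum c "monthly" else 0)) := by
  intro c
  induction c with
  | nil => intro m hm dp di dc wp wi wc mp mi mc; simp [pvMatchSum, pvT]
  | cons kv rest ih =>
    intro m hm dp di dc wp wi wc mp mi mc
    obtain ⟨k, v⟩ := kv
    rw [List.foldl_cons]
    by_cases hk : k ∈ pvPeriods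
    · rw [if_pos hk]
      rw [show ((k, v).1, m) = (k, m) from rfl, show ((k, v) : String × Int).2 = v from rfl]
      rw [pvTBump_pvT, ih _ hm]
      have hm3 : m = "prs" ∨ m = "issues" ∨ m = "commits" := by
        simpa [pvMetrics] using hm
      have hk3 : k = "daily" ∨ k = "weekly" ∨ k = "monthly" := by
        simpa [pvPeriods] using hk
      rcases hm3 with h1 | h1 | h1 <;> rcases hk3 with h2 | h2 | h2 <;> subst h1 <;> subst h2 <;>
        simp [pvT, pvMatchSum] <;> omega
    · simp only [if_neg hk]
      rw [ih _ hm]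
      have hk2 : k ≠ "daily" ∧ k ≠ "weekly" ∧ k ≠ "monthly" := by
        simp [pvPeriods] at hk; tauto
      simp [pvT, pvMatchSum, hk2.1, hk2.2.1, hk2.2.2]

theorem pvStats_canon : ∀ (s : List (String × List (String × Int))) (dp di dc wp wi wc mp mi mc : Int),
    s.foldl (fun tot mc' =>
      if mc'.1 ∈ pvMetrics then
        mc'.2.foldl (fun tot pn => if pn.1 ∈ pvPeriods then pvTBump tot (pn.1, mc'.1) pn.2 else tot) tot
      else tot) (pvT dp di dc wp wi wc mp mi mc) =
    pvT (dp + pvDSum s "prs" "daily") (di + pvDSum s "issues" "daily") (dc + pvDSum s "commits" "daily")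
        (wp + pvDSum s "prs" "weekly") (wi + pvDSum s "issues" "weekly") (wc + pvDSum s "commits" "weekly")
        (mp + pvDSum s "prs" "monthly") (mi + pvDSum s "issues" "monthly") (mc + pvDSum s "commits" "monthly") := by
  intro s
  induction s with
  | nil => intro dp di dc wp wi wc mp mi mc; simp [pvDSum]
  | cons mc' rest ih =>
    intro dp di dc wp wi wc mp mi mc
    obtain ⟨m, c⟩ := mc'
    rw [List.foldl_cons]
    by_cases hm : m ∈ pvMetrics
    · simp only [if_pos hm]
      rw [pvInner_canon c m hm, ih]
      simp only [pvT, pvDSum, List.cons.injEq, Prod.mk.injEq, and_true, true_and]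
      omega
    · simp only [if_neg hm]
      rw [ih]
      have hm' : m ≠ "prs" ∧ m ≠ "issues" ∧ m ≠ "commits" := by
        simp [pvMetrics] at hm; tauto
      simp [pvT, pvDSum, hm'.1, hm'.2.1, hm'.2.2]

theorem pvUsers_canon (ac : List (String × List (String × List (String × List (String × Int))))) :
    ∀ (cs : List String) (dp di dc wp wi wc mp mi mc : Int),
    cs.foldl (fun tot user =>
      (pvGet (pvGet ac user []) "stats" []).foldl (fun tot mc' =>
        if mc'.1 ∈ pvMetrics then
          mc'.2.foldl (fun tot pn => if pn.1 ∈ pvPeriods then pvTBump tot (pn.1, mc'.1) pn.2 else tot) tot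
        else tot) tot) (pvT dp di dc wp wi wc mp mi mc) =
    pvT (dp + (cs.map (fun u => pvDSum (pvGet (pvGet ac u []) "stats" []) "prs" "daily")).sum)
        (di + (cs.map (fun u => pvDSum (pvGet (pvGet ac u []) "stats" []) "issues" "daily")).sum)
        (dc + (cs.map (fun u => pvDSum (pvGet (pvGet ac u []) "stats" []) "commits" "daily")).sum)
        (wp + (cs.map (fun u => pvDSum (pvGet (pvGet ac u []) "stats" []) "prs" "weekly")).sum)
        (wi + (cs.map (fun u => pvDSum (pvGet (pvGet ac u []) "stats" []) "issues" "weekly")).sum)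
        (wc + (cs.map (fun u => pvDSum (pvGet (pvGet ac u []) "stats" []) "commits" "weekly")).sum)
        (mp + (cs.map (fun u => pvDSum (pvGet (pvGet ac u []) "stats" []) "prs" "monthly")).sum)
        (mi + (cs.map (fun u => pvDSum (pvGet (pvGet ac u []) "stats" []) "issues" "monthly")).sum)
        (mc + (cs.map (fun u => pvDSum (pvGet (pvGet ac u []) "stats" []) "commits" "monthly")).sum) := by
  intro cs
  induction cs with
  | nil => intro dp di dc wp wi wc mp mi mc; simp
  | cons u rest ih =>
    intro dp di dc wp wi wc mp mi mc
    rw [List.foldl_cons, pvStats_canon, ih]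
    simp [pvT, add_assoc]

-- with no entry for p, the match-sum is 0
theorem pvMatchSum_not_mem (c : List (String × Int)) (p : String) (h : p ∉ c.map Prod.fst) :
    pvMatchSum c p = 0 := by
  induction c with
  | nil => rfl
  | cons kv rest ih =>
    simp only [List.map_cons, List.mem_cons] at h
    push Not at h
    simp [pvMatchSum, Ne.symm h.1, ih h.2]

theorem pvMatchSum_nodup (c : List (String × Int)) (p : String) (h : (c.map Prod.fst).Nodup) :
    pvMatchSum c p = pvGet c p 0 := by
  induction c with
  | nil => rfl
  | cons kv rest ih =>
    obtain ⟨k, v⟩ := kv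
    simp only [List.map_cons, List.nodup_cons] at h
    by_cases hk : k = p
    · subst hk
      simp [pvMatchSum, pvGet, pvMatchSum_not_mem rest k h.1]
    · simp [pvMatchSum, pvGet, hk, ih h.2]

theorem pvDSum_not_mem (s : List (String × List (String × Int))) (m p : String)
    (h : m ∉ s.map Prod.fst) : pvDSum s m p = 0 := by
  induction s with
  | nil => rfl
  | cons kc rest ih =>
    simp only [List.map_cons, List.mem_cons] at h
    push Not at h
    simp [pvDSum, Ne.symm h.1, ih h.2]

theorem pvDSum_nodup (s : List (String × List (String × Int))) (m p : String)
    (h1 : (s.map Prod.fst).Nodup) (h2 : ∀ r ∈ s, (r.2.map Prod.fst).Nodup) :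
    pvDSum s m p = pvGet (pvGet s m []) p 0 := by
  induction s with
  | nil => rfl
  | cons kc rest ih =>
    obtain ⟨k, c⟩ := kc
    simp only [List.map_cons, List.nodup_cons] at h1
    by_cases hk : k = m
    · subst hk
      have hc : (c.map Prod.fst).Nodup := h2 (k, c) (by simp)
      simp [pvDSum, pvGet, pvDSum_not_mem rest k p h1.1, pvMatchSum_nodup c p hc]
    · simp only [pvDSum, pvGet, if_neg hk]
      simp
      exact ih h1.2 (fun r hr => h2 r (by simp [hr]))

-- pvGet returns the default or a value stored in the list
theorem pvGet_mem {V : Type} (m : List (String × V)) (k : String) (d : V) :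
    pvGet m k d = d ∨ (k, pvGet m k d) ∈ m := by
  induction m with
  | nil => left; rfl
  | cons kv rest ih =>
    obtain ⟨k', v⟩ := kv
    by_cases hk : k' = k
    · subst hk; right; simp [pvGet]
    · simp only [pvGet, if_neg hk]
      rcases ih with h | h
      · left; exact h
      · right; simp [h]

-- under Pre_'s nodup clause, B's data-driven sums coincide with A's get-chain cells
theorem pvCell_eq (ac : List (String × List (String × List (String × List (String × Int)))))
    (hpre : ∀ p ∈ ac, ∀ q ∈ p.2, (q.2.map Prod.fst).Nodup ∧ ∀ r ∈ q.2, (r.2.map Prod.fst).Nodup)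
    (u m p : String) :
    pvDSum (pvGet (pvGet ac u []) "stats" []) m p = pvCell ac u m p := by
  unfold pvCell
  rcases pvGet_mem ac u [] with hd | hd
  · rw [hd]; rfl
  · rcases pvGet_mem (pvGet ac u []) "stats" [] with hs | hs
    · rw [hs]; rfl
    · have := hpre _ hd _ hs
      exact pvDSum_nodup _ m p this.1 this.2

-- ===== VERDICT (by name: the statement is the Claim_ definition above) =====
theorem calculate_activity_trends_py_spec : Claim_equal_calculate_activity_trends_py := by
  intro contributors ac _ hpre
  unfold Spec_calculate_activity_trends_py calculate_activity_trends_py calculate_activity_trends_py_alt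
  have hA := pvLoop_canon ac contributors 0 0 0 0 0 0 0 0 0
  have hB := pvUsers_canon ac contributors 0 0 0 0 0 0 0 0 0
  have htot : pvTotals0 = pvT 0 0 0 0 0 0 0 0 0 := by rfl
  rw [htot] at *
  simp only [pvCanon] at hA
  rw [hA, hB]
  have hcell : ∀ m p : String,
      (contributors.map (fun u => pvDSum (pvGet (pvGet ac u []) "stats" []) m p)) =
      (contributors.map (fun u => pvCell ac u m p)) := by
    intro m p
    exact List.map_congr_left (fun u _ => pvCell_eq ac hpre.2 u m p)
  simp only [hcell]
  simp [pvPeriods, pvMetrics, pvTGet, pvT]
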